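-- pv_equiv track=rewrite | github.com/yifanyin11/partnr-planner | habitat_llm/planner/scripted_centralized_planner.py | is_earlier
-- ===== SOURCE A (Python) =====
-- def is_earlier(prop_1, prop_2, proposition_groups):
--     """
--     Check if proposition with index prop_1 happens earlier then prop_2
--     """
--     found_1 = False
--     found_2 = False
--     for prop_group in proposition_groups:
--         if prop_1 in prop_group:
--             found_1 = True
--         if prop_2 in prop_group:
--             found_2 = True
--         if found_1 and not found_2:
--             return True
--         if found_2 and not found_1:
--             return False
--     return False
-- ===== SOURCE B (Python) =====
-- def is_earlier(prop_1, prop_2, proposition_groups):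
--     """
--     Check if proposition with index prop_1 happens earlier then prop_2
--     """
--     groups = list(proposition_groups)
--
--     def first(p):
--         for i, g in enumerate(groups):
--             if p in g:
--                 return i
--         return len(groups)
--
--     return first(prop_1) < first(prop_2)
-- ===== Notes on version B (the rewrite author's own statement) =====
-- stated objective: simpler
-- what changed: Replaces the interleaved two-flag early-exit loop with a helper that returns the index of the first group containing a proposition (length of the list if absent), then simply compares first(prop_1) < first(prop_2).
import Mathlib
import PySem

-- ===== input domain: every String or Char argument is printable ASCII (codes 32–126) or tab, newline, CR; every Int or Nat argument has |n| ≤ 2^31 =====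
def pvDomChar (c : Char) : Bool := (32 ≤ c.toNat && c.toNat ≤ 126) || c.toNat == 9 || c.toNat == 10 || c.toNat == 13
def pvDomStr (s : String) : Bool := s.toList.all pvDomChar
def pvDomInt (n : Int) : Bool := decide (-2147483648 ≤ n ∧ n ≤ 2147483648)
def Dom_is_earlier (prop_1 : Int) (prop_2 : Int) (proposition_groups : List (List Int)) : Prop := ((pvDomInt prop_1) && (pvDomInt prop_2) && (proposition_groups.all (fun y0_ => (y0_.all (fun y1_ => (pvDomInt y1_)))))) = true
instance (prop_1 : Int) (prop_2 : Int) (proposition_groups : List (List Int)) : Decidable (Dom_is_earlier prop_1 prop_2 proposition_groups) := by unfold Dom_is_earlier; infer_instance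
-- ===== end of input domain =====

-- ===== PORT A =====
-- B is a simpler decomposition: first-containing-group index per proposition, compared with '<'.
def goA (prop_1 : Int) (prop_2 : Int) : List (List Int) → Bool → Bool → Bool
  | [], _, _ => false
  | g :: rest, found_1, found_2 =>
    let found_1' := found_1 || g.contains prop_1
    let found_2' := found_2 || g.contains prop_2
    if found_1' && !found_2' then true
    else if found_2' && !found_1' then false
    else goA prop_1 prop_2 rest found_1' found_2'

def is_earlier (prop_1 : Int) (prop_2 : Int) (proposition_groups : List (List Int)) : Bool :=
  goA prop_1 prop_2 proposition_groups false false

-- ===== PORT B =====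
-- Source B's `first`: index of the first group containing p, or the number of groups if none does.
def firstIdx (p : Int) : List (List Int) → Nat
  | [] => 0
  | g :: rest => if g.contains p then 0 else 1 + firstIdx p rest

def is_earlier_alt (prop_1 : Int) (prop_2 : Int) (proposition_groups : List (List Int)) : Bool :=
  decide (firstIdx prop_1 proposition_groups < firstIdx prop_2 proposition_groups)

-- ===== PRECONDITION & SPEC =====
def Spec_is_earlier (prop_1 : Int) (prop_2 : Int) (proposition_groups : List (List Int)) (out : Bool) : Prop := out = is_earlier_alt prop_1 prop_2 proposition_groups
instance (prop_1 : Int) (prop_2 : Int) (proposition_groups : List (List Int)) (out : Bool) : Decidable (Spec_is_earlier prop_1 prop_2 proposition_groups out) := by unfold Spec_is_earlier; infer_instance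

-- ===== CLAIM (what is proved, stated in full; the proofs are below) =====
def Claim_equal_is_earlier : Prop := ∀ (prop_1 : Int) (prop_2 : Int) (proposition_groups : List (List Int)), Dom_is_earlier prop_1 prop_2 proposition_groups → Spec_is_earlier prop_1 prop_2 proposition_groups (is_earlier prop_1 prop_2 proposition_groups)

-- ===== LEMMAS AND PROOFS =====

-- ===== VERDICT (by name: the statement is the Claim_ definition above) =====
theorem goA_true_true (p1 p2 : Int) (gs : List (List Int)) : goA p1 p2 gs true true = false := by
  induction gs with
  | nil => rfl
  | cons g rest ih => simp [goA, ih]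

theorem goA_eq (p1 p2 : Int) (gs : List (List Int)) :
    goA p1 p2 gs false false = decide (firstIdx p1 gs < firstIdx p2 gs) := by
  induction gs with
  | nil => rfl
  | cons g rest ih =>
    by_cases h1 : p1 ∈ g <;> by_cases h2 : p2 ∈ g <;>
      simp [goA, firstIdx, h1, h2, goA_true_true, ih]

theorem is_earlier_spec : Claim_equal_is_earlier := by
  intro p1 p2 gs _
  unfold Spec_is_earlier is_earlier is_earlier_alt
  exact goA_eq p1 p2 gs
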